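-- pv_equiv track=rewrite | github.com/hacker05090204-ops/YGB | python/phase12_evidence/consistency_engine.py | _is_deterministic
-- ===== SOURCE A (Python) =====
-- def _is_deterministic(steps: tuple) -> bool:
--     """Check if all steps are deterministic.
--
--     Non-deterministic markers: RANDOM, TIMESTAMP, UUID, NOW
--
--     Args:
--         steps: Tuple of replay steps
--
--     Returns:
--         True if all steps are deterministic
--     """
--     non_deterministic_markers = ["RANDOM", "TIMESTAMP", "UUID", "NOW"]
--     for step in steps:
--         step_upper = step.upper()
--         for marker in non_deterministic_markers:
--             if marker in step_upper:
--                 return False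
--     return True
-- ===== SOURCE B (Python) =====
-- # B: single left-to-right position scan per uppercased step with a first-character
-- # dispatch table, instead of A's four independent substring searches per step.
-- _BY_FIRST = {"R": ["RANDOM"], "T": ["TIMESTAMP"], "U": ["UUID"], "N": ["NOW"]}
--
--
-- def _scan(s: str) -> bool:
--     for i, ch in enumerate(s):
--         for m in _BY_FIRST.get(ch, []):
--             if s.startswith(m, i):
--                 return True
--     return False
--
--
-- def _is_deterministic(steps: tuple) -> bool:
--     return not any(_scan(step.upper()) for step in steps)
-- ===== Notes on version B (the rewrite author's own statement) =====
-- stated objective: alternative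
-- what changed: A tests each of the four markers with a separate substring search over every uppercased step; B makes a single left-to-right position scan per uppercased step, dispatching on the current character through a first-letter table and checking startswith at that position.
import Mathlib
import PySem

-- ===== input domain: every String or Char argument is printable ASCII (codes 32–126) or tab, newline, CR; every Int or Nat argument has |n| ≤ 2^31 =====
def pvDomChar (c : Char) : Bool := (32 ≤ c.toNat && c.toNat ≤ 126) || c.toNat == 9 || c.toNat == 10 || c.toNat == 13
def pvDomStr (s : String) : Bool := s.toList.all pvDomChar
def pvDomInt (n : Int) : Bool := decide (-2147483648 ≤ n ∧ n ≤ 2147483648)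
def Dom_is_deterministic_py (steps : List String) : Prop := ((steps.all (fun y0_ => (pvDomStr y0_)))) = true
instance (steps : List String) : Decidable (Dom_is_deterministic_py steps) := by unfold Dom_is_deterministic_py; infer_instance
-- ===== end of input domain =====

-- B replaces A's four independent substring searches per step by one left-to-right
-- position scan of the uppercased step with a first-character dispatch table (objective: alternative).

-- ===== PORT A =====
-- for step in steps: step_upper = step.upper(); for marker in markers: if marker in step_upper: return False
def is_deterministic_py : List String → Bool
  | [] => true
  | step :: rest =>
    let step_upper := PySem.Str.upper step
    if (["RANDOM", "TIMESTAMP", "UUID", "NOW"].any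
          (fun marker => PySem.Str.isIn marker step_upper)) then
      false
    else
      is_deterministic_py rest

-- ===== PORT B =====
-- _BY_FIRST.get(ch, []): the markers that can start at a position whose character is ch
def bMarkersFor (c : Char) : List (List Char) :=
  if c = 'R' then [['R', 'A', 'N', 'D', 'O', 'M']]
  else if c = 'T' then [['T', 'I', 'M', 'E', 'S', 'T', 'A', 'M', 'P']]
  else if c = 'U' then [['U', 'U', 'I', 'D']]
  else if c = 'N' then [['N', 'O', 'W']]
  else []

-- _scan: the 'for i, ch in enumerate(s)' loop as recursion on the suffix s[i:] = c :: rest;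
-- 's.startswith(m, i)' is exactly 'm.isPrefixOf (c :: rest)'
def bScan : List Char → Bool
  | [] => false
  | c :: rest => (bMarkersFor c).any (fun m => m.isPrefixOf (c :: rest)) || bScan rest

-- return not any(_scan(step.upper()) for step in steps)
def is_deterministic_py_alt (steps : List String) : Bool :=
  !(steps.any (fun step => bScan (PySem.Chars.upper step.toList)))

-- ===== PRECONDITION & SPEC =====
def Spec_is_deterministic_py (steps : List String) (out : Bool) : Prop := out = is_deterministic_py_alt steps
instance (steps : List String) (out : Bool) : Decidable (Spec_is_deterministic_py steps out) := by unfold Spec_is_deterministic_py; infer_instance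

-- ===== CLAIM (what is proved, stated in full; the proofs are below) =====
def Claim_equal_is_deterministic_py : Prop := ∀ (steps : List String), Dom_is_deterministic_py steps → Spec_is_deterministic_py steps (is_deterministic_py steps)

-- ===== LEMMAS AND PROOFS =====

-- the four markers as char lists
def pvMarkersL : List (List Char) :=
  [['R', 'A', 'N', 'D', 'O', 'M'], ['T', 'I', 'M', 'E', 'S', 'T', 'A', 'M', 'P'],
   ['U', 'U', 'I', 'D'], ['N', 'O', 'W']]

-- the first-character dispatch misses no prefix match: testing only bMarkersFor c at a
-- position starting with c is the same as testing all four markers there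
lemma bInner_iff (c : Char) (rest : List Char) :
    ((bMarkersFor c).any (fun m => m.isPrefixOf (c :: rest)) = true) ↔
      ∃ m ∈ pvMarkersL, m <+: c :: rest := by
  simp only [List.any_eq_true, List.isPrefixOf_iff_prefix]
  constructor
  · rintro ⟨m, hm, hp⟩
    refine ⟨m, ?_, hp⟩
    unfold bMarkersFor at hm
    split_ifs at hm <;> simp_all [pvMarkersL]
  · rintro ⟨m, hm, hp⟩
    refine ⟨m, ?_, hp⟩
    simp only [pvMarkersL, List.mem_cons, List.not_mem_nil, or_false] at hm
    rcases hm with h | h | h | h <;>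
      subst h <;>
      rcases (List.cons_prefix_cons.mp hp) with ⟨hc, -⟩ <;>
      simp [bMarkersFor, ← hc]

lemma bScan_iff (s : List Char) :
    bScan s = true ↔ ∃ m ∈ pvMarkersL, m <:+: s := by
  induction s with
  | nil => simp [bScan, pvMarkersL]
  | cons c rest ih =>
    simp only [bScan, Bool.or_eq_true, ih, bInner_iff]
    constructor
    · rintro (⟨m, hm, hp⟩ | ⟨m, hm, hi⟩)
      · exact ⟨m, hm, List.infix_cons_iff.mpr (Or.inl hp)⟩
      · exact ⟨m, hm, List.infix_cons_iff.mpr (Or.inr hi)⟩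
    · rintro ⟨m, hm, hi⟩
      rcases List.infix_cons_iff.mp hi with hp | hi'
      · exact Or.inl ⟨m, hm, hp⟩
      · exact Or.inr ⟨m, hm, hi'⟩

-- per-step agreement: A's four-marker 'in' test equals B's single scan
lemma step_test_eq (step : String) :
    (["RANDOM", "TIMESTAMP", "UUID", "NOW"].any
        (fun marker => PySem.Str.isIn marker (PySem.Str.upper step))) =
      bScan (PySem.Chars.upper step.toList) := by
  rw [Bool.eq_iff_iff, bScan_iff]
  have h1 : "RANDOM".toList = ['R', 'A', 'N', 'D', 'O', 'M'] := rfl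
  have h2 : "TIMESTAMP".toList = ['T', 'I', 'M', 'E', 'S', 'T', 'A', 'M', 'P'] := rfl
  have h3 : "UUID".toList = ['U', 'U', 'I', 'D'] := rfl
  have h4 : "NOW".toList = ['N', 'O', 'W'] := rfl
  simp only [List.any_cons, List.any_nil, Bool.or_eq_true, Bool.false_eq_true, or_false,
    PySem.Str.isIn_eq, PySem.Str.toList_upper, h1, h2, h3, h4, PySem.Chars.isIn_iff_infix,
    pvMarkersL, List.mem_cons, List.not_mem_nil]
  constructor
  · rintro (h | h | h | h)
    · exact ⟨_, Or.inl rfl, h⟩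
    · exact ⟨_, Or.inr (Or.inl rfl), h⟩
    · exact ⟨_, Or.inr (Or.inr (Or.inl rfl)), h⟩
    · exact ⟨_, Or.inr (Or.inr (Or.inr rfl)), h⟩
  · rintro ⟨m, hm, h⟩
    rcases hm with rfl | rfl | rfl | rfl
    · exact Or.inl h
    · exact Or.inr (Or.inl h)
    · exact Or.inr (Or.inr (Or.inl h))
    · exact Or.inr (Or.inr (Or.inr h))

lemma ab_eq (steps : List String) :
    is_deterministic_py steps = is_deterministic_py_alt steps := by
  induction steps with
  | nil => rfl
  | cons step rest ih =>
    have hA : is_deterministic_py (step :: rest) =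
        (if (["RANDOM", "TIMESTAMP", "UUID", "NOW"].any
              (fun marker => PySem.Str.isIn marker (PySem.Str.upper step))) then false
         else is_deterministic_py rest) := rfl
    rw [hA, step_test_eq]
    cases h : bScan (PySem.Chars.upper step.toList)
    · simp [is_deterministic_py_alt, h, ih]
    · simp [is_deterministic_py_alt, h]

-- ===== VERDICT (by name: the statement is the Claim_ definition above) =====
theorem is_deterministic_py_spec : Claim_equal_is_deterministic_py := by
  intro steps _
  unfold Spec_is_deterministic_py
  exact ab_eq steps
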